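-- pv_equiv track=rewrite | github.com/solace-dgrama/tools | misc/gen_action_list.py | _has_action_before_recovery
-- ===== SOURCE A (Python) =====
-- from typing import Dict, List, Optional
--
-- def _parse_item(raw: str):
--     """Split 'action:targets:value' into (action, targets_list, value)."""
--     parts = raw.split(":")
--     action = parts[0] if parts else ""
--     targets_str = parts[1] if len(parts) > 1 else ""
--     value = parts[2] if len(parts) > 2 else ""
--     return action, [t for t in targets_str.split("-") if t], value
--
-- def _has_action_before_recovery(
--     action_list: List[str],
--     start_idx: int,
--     targets: List[str],
--     recovery_action: str,
-- ) -> bool: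
--     """
--     Returns True if, for any target in targets, the do-action on that target
--     appears in action_list at or after start_idx before the recovery_action
--     for that target.  Replicates HasActionOnTargetBeforeRecovery from Tcl.
--     """
--     for target in targets:
--         for i in range(start_idx, len(action_list)):
--             fwd_action, fwd_targets, _ = _parse_item(action_list[i])
--             if target in fwd_targets:
--                 if fwd_action == recovery_action:
--                     break
--                 return True
--     return False
-- ===== SOURCE B (Python) =====
-- def _has_action_before_recovery(action_list, start_idx, targets, recovery_action):
--     # Single pass: walk the action list once, keeping the set of targets whose
--     # first mention has not been seen yet; a first mention with a non-recovery
--     # action answers True, a recovery mention retires the target.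
--     pending = set(targets)
--     for i in range(start_idx, len(action_list)):
--         if not pending:
--             return False
--         parts = action_list[i].split(":")
--         action = parts[0]
--         fwd = parts[1].split("-") if len(parts) > 1 else []
--         for t in fwd:
--             if t and t in pending:
--                 if action != recovery_action:
--                     return True
--                 pending.discard(t)
--     return False
-- ===== Notes on version B (the rewrite author's own statement) =====
-- stated objective: faster
-- what changed: Instead of re-scanning the action list once per target, B walks the list once, parsing each item a single time and maintaining the set of targets whose first mention is still pending; a non-recovery first mention returns True, a recovery mention retires the target.
import Mathlib
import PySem

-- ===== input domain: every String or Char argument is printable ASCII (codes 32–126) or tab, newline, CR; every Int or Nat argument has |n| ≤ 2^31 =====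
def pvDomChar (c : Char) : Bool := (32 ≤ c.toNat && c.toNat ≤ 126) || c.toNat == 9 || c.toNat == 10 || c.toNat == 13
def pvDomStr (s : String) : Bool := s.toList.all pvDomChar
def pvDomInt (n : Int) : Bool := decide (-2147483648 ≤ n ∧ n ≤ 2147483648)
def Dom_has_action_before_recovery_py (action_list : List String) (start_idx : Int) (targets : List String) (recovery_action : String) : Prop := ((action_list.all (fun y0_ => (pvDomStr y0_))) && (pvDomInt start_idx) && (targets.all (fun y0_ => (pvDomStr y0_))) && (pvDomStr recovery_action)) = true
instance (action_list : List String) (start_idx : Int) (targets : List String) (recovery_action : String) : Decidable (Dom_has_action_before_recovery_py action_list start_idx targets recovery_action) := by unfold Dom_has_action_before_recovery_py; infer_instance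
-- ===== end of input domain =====

-- B replaces A's per-target rescans of the action list by one pass that parses each
-- item once and tracks the still-unmentioned targets in a set (objective: faster).


-- ===== PORT A =====
-- raw.split(sep) for the literal nonempty separators ":" and "-": split? is some there,
-- the [] default is never taken.
def pvSplit (s sep : String) : List String := (PySem.Str.split? s sep).getD []

-- _parse_item: 'action:targets:value' → (action, non-empty targets, value)
def pvParseItem (raw : String) : String × List String × String :=
  let parts := pvSplit raw ":"
  let action := if parts ≠ [] then parts.getD 0 "" else ""
  let targets_str := if parts.length > 1 then parts.getD 1 "" else ""
  let value := if parts.length > 2 then parts.getD 2 "" else ""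
  (action, (pvSplit targets_str "-").filter (fun t => t ≠ ""), value)

-- A's inner loop: for i in range(start_idx, len(action_list)) for one target.
-- pyGet? = none is where Python raises IndexError (excluded by Pre_); returns false there.
def pvScanA (action_list : List String) (recovery_action : String) (target : String) : List Int → Bool
  | [] => false
  | i :: rest =>
    match PySem.List.pyGet? action_list i with
    | none => false
    | some raw =>
      let p := pvParseItem raw
      if target ∈ p.2.1 then
        (if p.1 == recovery_action then false else true)
      else pvScanA action_list recovery_action target rest

def has_action_before_recovery_py (action_list : List String) (start_idx : Int) (targets : List String) (recovery_action : String) : Bool :=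
  targets.any (fun target =>
    pvScanA action_list recovery_action target (PySem.List.pyRange start_idx (action_list.length : Int) 1))

-- ===== PORT B =====
-- B's per-item loop: for t in fwd: if t and t in pending: …
def pvStepB (recovery_action action : String) : List String → PySem.Set String → Bool × PySem.Set String
  | [], pending => (false, pending)
  | t :: ts, pending =>
    if t ≠ "" ∧ PySem.Set.contains pending t then
      if action ≠ recovery_action then (true, pending)
      else pvStepB recovery_action action ts (PySem.Set.discard pending t)
    else pvStepB recovery_action action ts pending

-- B's main loop over range(start_idx, len(action_list)); pyGet? = none is Python's
-- IndexError (excluded by Pre_), returns false there.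
def pvLoopB (action_list : List String) (recovery_action : String) : List Int → PySem.Set String → Bool
  | [], _ => false
  | i :: rest, pending =>
    if pending = [] then false
    else
      match PySem.List.pyGet? action_list i with
      | none => false
      | some raw =>
        let parts := pvSplit raw ":"
        let action := parts.getD 0 ""
        let fwd := if parts.length > 1 then pvSplit (parts.getD 1 "") "-" else []
        match pvStepB recovery_action action fwd pending with
        | (true, _) => true
        | (false, pending') => pvLoopB action_list recovery_action rest pending'

def has_action_before_recovery_py_alt (action_list : List String) (start_idx : Int) (targets : List String) (recovery_action : String) : Bool :=
  pvLoopB action_list recovery_action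
    (PySem.List.pyRange start_idx (action_list.length : Int) 1)
    (PySem.Set.ofList targets)

-- ===== PRECONDITION & SPEC =====
-- Pre_ excludes exactly the inputs where Python A raises IndexError: a nonempty
-- targets list together with start_idx < -len(action_list) (negative-index wraparound
-- past the front); B raises there too.
def Pre_has_action_before_recovery_py (action_list : List String) (start_idx : Int) (targets : List String) (recovery_action : String) : Prop :=
  targets = [] ∨ -(action_list.length : Int) ≤ start_idx
instance (action_list : List String) (start_idx : Int) (targets : List String) (recovery_action : String) : Decidable (Pre_has_action_before_recovery_py action_list start_idx targets recovery_action) := by unfold Pre_has_action_before_recovery_py; infer_instance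

def pvWitness_has_action_before_recovery_py : List String × Int × List String × String :=
  (["do:t1-t2:v", "rec:t1:v"], 0, ["t1", "t2"], "rec")

def Spec_has_action_before_recovery_py (action_list : List String) (start_idx : Int) (targets : List String) (recovery_action : String) (out : Bool) : Prop := out = has_action_before_recovery_py_alt action_list start_idx targets recovery_action
instance (action_list : List String) (start_idx : Int) (targets : List String) (recovery_action : String) (out : Bool) : Decidable (Spec_has_action_before_recovery_py action_list start_idx targets recovery_action out) := by unfold Spec_has_action_before_recovery_py; infer_instance

-- ===== CLAIM (what is proved, stated in full; the proofs are below) =====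
def Claim_equal_has_action_before_recovery_py : Prop := ∀ (action_list : List String) (start_idx : Int) (targets : List String) (recovery_action : String), Dom_has_action_before_recovery_py action_list start_idx targets recovery_action → Pre_has_action_before_recovery_py action_list start_idx targets recovery_action → Spec_has_action_before_recovery_py action_list start_idx targets recovery_action (has_action_before_recovery_py action_list start_idx targets recovery_action)

-- ===== LEMMAS AND PROOFS =====

-- B's per-item loop when the action is NOT the recovery action: pending is never
-- modified, and the flag is whether some non-empty listed target is pending.
lemma pvStepB_of_ne (r a : String) (h : a ≠ r) :
    ∀ (fwd : List String) (pending : PySem.Set String),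
      pvStepB r a fwd pending = (fwd.any (fun t => t ≠ "" && pending.contains t), pending) := by
  intro fwd
  induction fwd with
  | nil => intro pending; simp [pvStepB]
  | cons t ts ih =>
    intro pending
    simp only [pvStepB, List.any_cons]
    rw [if_pos h]
    by_cases hc : t ≠ "" ∧ PySem.Set.contains pending t
    · rw [if_pos hc]
      simp [hc.1, (PySem.Set.contains_iff pending t).mp hc.2]
    · rw [if_neg hc, ih]
      have hX : (decide (t ≠ "") && pending.contains t) = false := by
        rcases not_and_or.mp hc with h1 | h2
        · simp [not_not.mp h1]
        · have : t ∉ pending := fun hm => h2 ((PySem.Set.contains_iff pending t).mpr hm)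
          simp [this]
      simp
      intro ht hm
      exact absurd hX (by simp [ht, hm])

-- B's per-item loop when the action IS the recovery action: flag false, nodup kept,
-- and a target stays pending iff it was pending and is not a non-empty listed target.
lemma pvStepB_of_eq (r : String) :
    ∀ (fwd : List String) (pending : PySem.Set String), pending.Nodup →
      (pvStepB r r fwd pending).1 = false ∧ (pvStepB r r fwd pending).2.Nodup ∧
      (∀ x, x ∈ (pvStepB r r fwd pending).2 ↔ x ∈ pending ∧ ¬(x ≠ "" ∧ x ∈ fwd)) := by
  intro fwd
  induction fwd with
  | nil => intro pending hnd; simp [pvStepB, hnd]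
  | cons t ts ih =>
    intro pending hnd
    simp only [pvStepB]
    by_cases hc : t ≠ "" ∧ PySem.Set.contains pending t
    · rw [if_pos hc, if_neg (fun hh => hh rfl)]
      obtain ⟨h1, h2, h3⟩ := ih (PySem.Set.discard pending t) (PySem.Set.nodup_discard pending t hnd)
      refine ⟨h1, h2, fun x => ?_⟩
      rw [h3, PySem.Set.mem_discard]
      constructor
      · rintro ⟨⟨hx, hxt⟩, hn⟩
        exact ⟨hx, by
          rintro ⟨hne, hm⟩
          rcases List.mem_cons.mp hm with h | h
          · exact hxt h
          · exact hn ⟨hne, h⟩⟩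
      · rintro ⟨hx, hn⟩
        refine ⟨⟨hx, fun hxt => ?_⟩, fun ⟨hne, hm⟩ => hn ⟨hne, List.mem_cons_of_mem _ hm⟩⟩
        subst hxt
        exact hn ⟨hc.1, List.mem_cons_self⟩
    · simp only [hc, if_false]
      obtain ⟨h1, h2, h3⟩ := ih pending hnd
      refine ⟨h1, h2, fun x => ?_⟩
      rw [h3]
      constructor
      · rintro ⟨hx, hn⟩
        exact ⟨hx, by
          rintro ⟨hne, hm⟩
          rcases List.mem_cons.mp hm with h | h
          · subst h; exact hc ⟨hne, (PySem.Set.contains_iff pending x).mpr hx⟩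
          · exact hn ⟨hne, h⟩⟩
      · rintro ⟨hx, hn⟩
        exact ⟨hx, fun ⟨hne, hm⟩ => hn ⟨hne, List.mem_cons_of_mem _ hm⟩⟩

-- A's parsed target list is B's raw split with the empty pieces dropped.
lemma parseAux (parts : List String) :
    (if parts ≠ [] then parts.getD 0 "" else "") = parts.getD 0 "" := by
  cases parts <;> simp

lemma parseItem_eq (raw : String) :
    pvParseItem raw =
      (((pvSplit raw ":").getD 0 ""),
       ((if (pvSplit raw ":").length > 1 then pvSplit ((pvSplit raw ":").getD 1 "") "-" else []).filter
          (fun t => t ≠ "")),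
       (if (pvSplit raw ":").length > 2 then (pvSplit raw ":").getD 2 "" else "")) := by
  simp only [pvParseItem, parseAux]
  by_cases h1 : (pvSplit raw ":").length > 1
  · simp [h1]
  · have hfilter : (pvSplit "" "-").filter (fun t => !decide (t = "")) = [] := by decide
    simp [h1, hfilter]

-- MAIN INVARIANT: B's single pass over in-range indices equals A's per-target any.
lemma loopB_eq (action_list : List String) (r : String) :
    ∀ (L : List Int) (pending : List String), pending.Nodup →
      (∀ i ∈ L, PySem.Raise.InRange action_list.length i) →
      pvLoopB action_list r L pending = pending.any (fun t => pvScanA action_list r t L) := by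
  intro L
  induction L with
  | nil => intro pending _ _; simp [pvLoopB, pvScanA]
  | cons i rest ih =>
    intro pending hnd hrange
    have hi : PySem.Raise.InRange action_list.length i := hrange i (List.mem_cons_self)
    have hrest : ∀ j ∈ rest, PySem.Raise.InRange action_list.length j :=
      fun j hj => hrange j (List.mem_cons_of_mem _ hj)
    obtain ⟨raw, hraw⟩ : ∃ raw, PySem.List.pyGet? action_list i = some raw := by
      cases hg : PySem.List.pyGet? action_list i with
      | none => exact absurd hi ((PySem.List.pyGet?_eq_none_iff action_list i).mp hg)
      | some raw => exact ⟨raw, rfl⟩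
    by_cases hpe : pending = []
    · subst hpe; simp [pvLoopB]
    · simp only [pvLoopB, if_neg hpe, hraw]
      set parts := pvSplit raw ":" with hparts
      set action := parts.getD 0 "" with haction
      set fwd := (if parts.length > 1 then pvSplit (parts.getD 1 "") "-" else []) with hfwd
      have hscan : ∀ t, pvScanA action_list r t (i :: rest) =
          (if t ∈ fwd.filter (fun t => t ≠ "") then (if action == r then false else true)
           else pvScanA action_list r t rest) := by
        intro t
        simp only [pvScanA, hraw]
        rw [parseItem_eq raw]
      by_cases har : action = r
      · -- recovery mention: no True from this item; pending shrinks by fwd's targets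
        rw [har]
        obtain ⟨h1, h2, h3⟩ := pvStepB_of_eq r fwd pending hnd
        cases hs : pvStepB r r fwd pending with
        | mk flag pending2 =>
          rw [hs] at h1 h2 h3
          simp only at h1 h2 h3
          subst h1
          simp only
          rw [ih pending2 h2 hrest, Bool.eq_iff_iff]
          simp only [List.any_eq_true]
          constructor
          · rintro ⟨t, ht, htt⟩
            obtain ⟨htp, htn⟩ := (h3 t).mp ht
            refine ⟨t, htp, ?_⟩
            rw [hscan t, if_neg ?_]
            · exact htt
            · intro hm
              rcases List.mem_filter.mp hm with ⟨hmf, hne⟩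
              exact htn ⟨by simpa using hne, hmf⟩
          · rintro ⟨t, ht, htt⟩
            rw [hscan t] at htt
            by_cases htm : t ∈ fwd.filter (fun t => t ≠ "")
            · rw [if_pos htm] at htt
              simp [har] at htt
            · rw [if_neg htm] at htt
              refine ⟨t, (h3 t).mpr ⟨ht, ?_⟩, htt⟩
              rintro ⟨hne, hmf⟩
              exact htm (List.mem_filter.mpr ⟨hmf, by simpa using hne⟩)
      · -- non-recovery action: True iff some pending target is listed; else recurse
        rw [pvStepB_of_ne r action har fwd pending]
        cases hb : fwd.any (fun t => decide (t ≠ "") && PySem.Set.contains pending t) with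
        | true =>
          simp only
          rw [Bool.eq_iff_iff]
          simp only [List.any_eq_true]
          rw [List.any_eq_true] at hb
          obtain ⟨t, htf, htc⟩ := hb
          have htne : t ≠ "" := by
            intro he
            simp [he] at htc
          have htp : t ∈ pending := by
            have := (Bool.and_eq_true _ _).mp htc
            exact (PySem.Set.contains_iff pending t).mp this.2
          constructor
          · intro _
            refine ⟨t, htp, ?_⟩
            rw [hscan t, if_pos (List.mem_filter.mpr ⟨htf, by simpa using htne⟩)]
            simp [har]
          · intro _; trivial
        | false =>
          simp only
          rw [ih pending hnd hrest, Bool.eq_iff_iff]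
          simp only [List.any_eq_true]
          have hno : ∀ t, t ∈ pending → t ∉ fwd.filter (fun t => t ≠ "") := by
            intro t ht hm
            rcases List.mem_filter.mp hm with ⟨hmf, hne⟩
            have : fwd.any (fun t => decide (t ≠ "") && PySem.Set.contains pending t) = true := by
              rw [List.any_eq_true]
              refine ⟨t, hmf, ?_⟩
              simp [by simpa using hne, ht]
            rw [hb] at this
            exact absurd this (by simp)
          constructor
          · rintro ⟨t, ht, htt⟩
            refine ⟨t, ht, ?_⟩
            rw [hscan t, if_neg (hno t ht)]
            exact htt
          · rintro ⟨t, ht, htt⟩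
            rw [hscan t, if_neg (hno t ht)] at htt
            exact ⟨t, ht, htt⟩

-- ===== VERDICT (by name: the statement is the Claim_ definition above) =====
theorem has_action_before_recovery_py_spec : Claim_equal_has_action_before_recovery_py := by
  intro action_list start_idx targets recovery_action _ hpre
  unfold Spec_has_action_before_recovery_py has_action_before_recovery_py has_action_before_recovery_py_alt
  rcases hpre with h | h
  · subst h
    cases hL : PySem.List.pyRange start_idx (action_list.length : Int) 1 with
    | nil => simp [pvLoopB]
    | cons i rest => simp [pvLoopB, PySem.Set.ofList]
  · rw [loopB_eq action_list recovery_action _ (PySem.Set.ofList targets)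
        (PySem.Set.nodup_ofList targets)
        (fun i hi => by
          rcases (PySem.List.mem_pyRange_one).mp hi with ⟨h1, h2⟩
          exact ⟨by omega, by omega⟩)]
    rw [Bool.eq_iff_iff]
    simp only [List.any_eq_true]
    constructor
    · rintro ⟨t, ht, htt⟩; exact ⟨t, (PySem.Set.mem_ofList targets t).mpr ht, htt⟩
    · rintro ⟨t, ht, htt⟩; exact ⟨t, (PySem.Set.mem_ofList targets t).mp ht, htt⟩
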